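-- pv_equiv track=rewrite | github.com/pypi-data/pypi-code-129 | aiida-core/aiida_core-1.6.9-py3-none-any.whl/engine/processes/process.py | _get_namespace_list
-- ===== SOURCE A (Python) =====
-- from typing import (
--     Any, cast, Dict, Iterable, Iterator, List, MutableMapping, Optional, Type, Tuple, Union, TYPE_CHECKING
-- )
--
-- def _get_namespace_list(namespace: Optional[str] = None, agglomerate: bool = True) -> List[Optional[str]]:
--     """Get the list of namespaces in a given namespace.
--
--     :param namespace: name space
--     :param agglomerate: If set to true, all parent namespaces of the given ``namespace`` will also
--         be searched.
--
--     :returns: namespace list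
--
--     """
--     if not agglomerate:
--         return [namespace]
--
--     namespace_list: List[Optional[str]] = [None]
--     if namespace is not None:
--         split_ns = namespace.split('.')
--         namespace_list.extend(['.'.join(split_ns[:i]) for i in range(1, len(split_ns) + 1)])
--     return namespace_list
-- ===== SOURCE B (Python) =====
-- from typing import List, Optional
--
-- def _get_namespace_list(namespace: Optional[str] = None, agglomerate: bool = True) -> List[Optional[str]]:
--     """Build [None] plus the cumulative dotted prefixes of namespace, incrementally."""
--     if not agglomerate:
--         return [namespace]
--     result: List[Optional[str]] = [None]
--     if namespace is not None:
--         current: Optional[str] = None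
--         for part in namespace.split('.'):
--             current = part if current is None else current + '.' + part
--             result.append(current)
--     return result
-- ===== Notes on version B (the rewrite author's own statement) =====
-- stated objective: alternative
-- what changed: Replaces the comprehension that re-slices and re-joins split_ns[:i] for every i with a single pass over the parts carrying a running prefix string accumulator.
import Mathlib
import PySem

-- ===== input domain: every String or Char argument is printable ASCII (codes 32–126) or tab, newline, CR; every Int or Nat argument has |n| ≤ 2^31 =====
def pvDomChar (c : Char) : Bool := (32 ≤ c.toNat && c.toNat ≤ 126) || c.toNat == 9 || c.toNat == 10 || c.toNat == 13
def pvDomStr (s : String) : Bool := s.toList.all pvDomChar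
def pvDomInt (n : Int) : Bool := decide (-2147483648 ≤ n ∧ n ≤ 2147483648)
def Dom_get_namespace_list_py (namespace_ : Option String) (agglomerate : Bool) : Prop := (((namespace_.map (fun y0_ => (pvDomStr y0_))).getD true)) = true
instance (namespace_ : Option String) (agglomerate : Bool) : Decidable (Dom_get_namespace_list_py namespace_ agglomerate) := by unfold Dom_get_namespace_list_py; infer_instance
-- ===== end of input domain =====

-- B replaces A's slice-and-rejoin comprehension with a single left-to-right pass
-- carrying a running prefix accumulator (alternative decomposition, same results).


-- ===== PORT A =====
def get_namespace_list_py (namespace_ : Option String) (agglomerate : Bool) : List (Option String) :=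
  if !agglomerate then [namespace_]
  else
    let namespace_list : List (Option String) := [none]
    match namespace_ with
    | none => namespace_list
    | some ns =>
      -- split_ns = ns.split('.'); sep "." is nonempty, so split? is always `some`
      let split_ns : List String := (PySem.Str.split? ns ".").getD []
      namespace_list ++
        (PySem.List.pyRange 1 ((split_ns.length : Int) + 1)).map
          (fun i => some (PySem.Str.join "." (PySem.List.slice split_ns none (some i))))

-- ===== PORT B =====
-- the loop body of Source B: current = part if current is None else current + '.' + part; result.append(current)
def pvStepB (st : List (Option String) × Option String) (part : String) :
    List (Option String) × Option String :=
  match st.2 with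
  | none => (st.1 ++ [some part], some part)
  | some c => (st.1 ++ [some (c ++ "." ++ part)], some (c ++ "." ++ part))

def get_namespace_list_py_alt (namespace_ : Option String) (agglomerate : Bool) : List (Option String) :=
  if !agglomerate then [namespace_]
  else
    match namespace_ with
    | none => [none]
    | some ns =>
      ((((PySem.Str.split? ns ".").getD []).foldl pvStepB ([none], none))).1

-- ===== PRECONDITION & SPEC =====
def Spec_get_namespace_list_py (namespace_ : Option String) (agglomerate : Bool) (out : List (Option String)) : Prop := out = get_namespace_list_py_alt namespace_ agglomerate
instance (namespace_ : Option String) (agglomerate : Bool) (out : List (Option String)) : Decidable (Spec_get_namespace_list_py namespace_ agglomerate out) := by unfold Spec_get_namespace_list_py; infer_instance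

-- ===== CLAIM (what is proved, stated in full; the proofs are below) =====
def Claim_equal_get_namespace_list_py : Prop := ∀ (namespace_ : Option String) (agglomerate : Bool), Dom_get_namespace_list_py namespace_ agglomerate → Spec_get_namespace_list_py namespace_ agglomerate (get_namespace_list_py namespace_ agglomerate)

-- ===== LEMMAS AND PROOFS =====

-- cumulative prefixes as B's loop produces them, for the proof
def pvPrefs (cur : String) : List String → List (Option String)
  | [] => []
  | p :: ps => some (cur ++ "." ++ p) :: pvPrefs (cur ++ "." ++ p) ps

theorem pvCharsJoin_snoc (sep y : List Char) :
    ∀ (l : List (List Char)), l ≠ [] →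
      PySem.Chars.join sep (l ++ [y]) = PySem.Chars.join sep l ++ sep ++ y := by
  intro l
  induction l with
  | nil => intro h; exact absurd rfl h
  | cons a t ih =>
    intro _
    cases t with
    | nil =>
      simp [PySem.Chars.join_cons_cons, PySem.Chars.join_singleton]
    | cons b r =>
      rw [show ((a :: b :: r : List (List Char)) ++ [y]) = a :: b :: (r ++ [y]) by simp]
      rw [PySem.Chars.join_cons_cons, PySem.Chars.join_cons_cons]
      rw [show (b :: (r ++ [y]) : List (List Char)) = (b :: r) ++ [y] by simp]
      rw [ih (by simp)]
      simp [List.append_assoc]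

theorem pvJoin_snoc (xs : List String) (y : String) (h : xs ≠ []) :
    PySem.Str.join "." (xs ++ [y]) = PySem.Str.join "." xs ++ "." ++ y := by
  apply String.toList_injective
  simp only [PySem.Str.toList_join, String.toList_append, List.map_append, List.map_cons,
    List.map_nil]
  exact pvCharsJoin_snoc _ _ _ (by simpa using h)

theorem pvJoin_singleton (x : String) : PySem.Str.join "." [x] = x := by
  apply String.toList_injective
  simp [PySem.Str.toList_join, PySem.Chars.join_singleton]

theorem pvFoldB (ps : List String) :
    ∀ (acc : List (Option String)) (cur : String),
      (ps.foldl pvStepB (acc, some cur)).1 = acc ++ pvPrefs cur ps := by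
  induction ps with
  | nil => intro acc cur; simp [pvPrefs]
  | cons p t ih =>
    intro acc cur
    simp only [List.foldl_cons, pvStepB]
    rw [ih]
    simp [pvPrefs]

theorem pvMapRange (ps : List String) :
    ∀ (pre : List String), pre ≠ [] →
      (List.range ps.length).map
        (fun k => some (PySem.Str.join "." ((pre ++ ps).take (pre.length + (k + 1)))))
        = pvPrefs (PySem.Str.join "." pre) ps := by
  induction ps with
  | nil => intro pre _; simp [pvPrefs]
  | cons q qs ih =>
    intro pre hpre
    have hlen : (q :: qs).length = qs.length + 1 := rfl
    rw [hlen, List.range_succ_eq_map, List.map_cons, List.map_map]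
    have h0 : (pre ++ q :: qs).take (pre.length + (0 + 1)) = pre ++ [q] := by
      rw [List.take_append]
      rw [List.take_of_length_le (by omega)]
      rw [show pre.length + (0 + 1) - pre.length = 1 by omega]
      rfl
    have htail :
        (List.range qs.length).map
          ((fun k => some (PySem.Str.join "." ((pre ++ q :: qs).take (pre.length + (k + 1))))) ∘ Nat.succ)
          = pvPrefs (PySem.Str.join "." (pre ++ [q])) qs := by
      rw [← ih (pre ++ [q]) (by simp)]
      apply List.map_congr_left
      intro k _
      simp only [Function.comp_apply]
      rw [show pre ++ q :: qs = (pre ++ [q]) ++ qs by simp]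
      rw [show pre.length + (Nat.succ k + 1) = (pre ++ [q]).length + (k + 1) by
        simp; omega]
    rw [htail, h0, pvJoin_snoc pre q hpre]
    simp [pvPrefs]

theorem pvMain (namespace_ : Option String) (agglomerate : Bool) :
    get_namespace_list_py namespace_ agglomerate = get_namespace_list_py_alt namespace_ agglomerate := by
  cases agglomerate with
  | false => rfl
  | true =>
    cases namespace_ with
    | none => rfl
    | some ns =>
      simp only [get_namespace_list_py, get_namespace_list_py_alt, Bool.not_true,
        Bool.false_eq_true, if_false]
      cases hsplit : (PySem.Str.split? ns ".").getD [] with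
      | nil =>
        norm_num [PySem.List.pyRange_one_eq_nil (by norm_num : ((0:Int) + 1) ≤ 1)]
      | cons p t =>
        -- B side: one foldl step, then the accumulator invariant
        have hB : ((p :: t).foldl pvStepB ([none], none)).1
            = [none, some p] ++ pvPrefs p t := by
          simp only [List.foldl_cons, pvStepB]
          rw [pvFoldB]
          rfl
        rw [hB]
        -- A side
        have hn : (((p :: t).length : Int) + 1 - 1).toNat = t.length + 1 := by simp
        rw [PySem.List.pyRange_one, hn, List.range_succ_eq_map, List.map_map,
          List.map_cons, List.map_map]
        simp only [List.cons_append, List.nil_append]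
        congr 1
        congr 1
        · -- head element: prefix of length 1 is just p
          simp only [Function.comp_apply]
          rw [show ((1 : Int) + ((0 : Nat) : Int)) = (((1 : Nat) : Int)) by norm_num]
          rw [PySem.List.slice_to_natCast]
          simp [pvJoin_singleton]
        · -- tail: the remaining prefixes, by the invariant pvMapRange with pre = [p]
          have hm := pvMapRange t [p] (by simp)
          rw [pvJoin_singleton] at hm
          rw [← hm]
          apply List.map_congr_left
          intro k _
          simp only [Function.comp_apply, List.singleton_append, List.length_cons,
            List.length_nil]
          rw [show ((1 : Int) + ((Nat.succ k : Nat) : Int)) = (((k + 2 : Nat)) : Int) by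
            push_cast; omega]
          rw [PySem.List.slice_to_natCast]
          rw [show (0 : Nat) + 1 + (k + 1) = k + 2 by omega]

-- ===== VERDICT (by name: the statement is the Claim_ definition above) =====
theorem get_namespace_list_py_spec : Claim_equal_get_namespace_list_py := by
  intro namespace_ agglomerate _
  unfold Spec_get_namespace_list_py
  exact pvMain namespace_ agglomerate
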